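-- pv_equiv track=rewrite | github.com/gopar/cecli | cecli/helpers/requests.py | concatenate_user_messages
-- ===== SOURCE A (Python) =====
-- def concatenate_user_messages(messages):
--     """Concatenate user messages at the end of the array separated by assistant "(empty response)" messages.
--
--     This function works backwards from the end of the messages array, collecting
--     user messages until it encounters an assistant message that is not "(empty response)",
--     a tool message, or a system message. All collected user messages are concatenated
--     into a single user message at the end, and the original user messages are removed.
--
--     Args:
--         messages: List of message dictionaries
--
--     Returns:
--         List of messages with concatenated user messages
--     """
--     if not messages:
--         return messages
--
--     # Work backwards from the end
--     user_messages_to_concat = []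
--     i = len(messages) - 1
--
--     while i >= 0:
--         msg = messages[i]
--         role = msg.get("role")
--         content = msg.get("content", "")
--
--         # If it's a user message, add it to the collection
--         if role == "user":
--             user_messages_to_concat.insert(0, content)  # Insert at beginning to maintain order
--             i -= 1
--             continue
--
--         # If it's an assistant message with "(empty response)", skip it and continue backwards
--         if role == "assistant" and content == "(empty response)":
--             i -= 1
--             continue
--
--         # If we hit any other type of message (non-empty assistant, tool, system, etc.), stop
--         break
--
--     # If we collected any user messages to concatenate
--     if user_messages_to_concat:
--         # Remove the original user messages (and any skipped empty assistant messages)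
--         # by keeping only messages up to index i (inclusive)
--         result = messages[: i + 1] if i >= 0 else []
--
--         # Add the concatenated user message at the end
--         concatenated_content = "\n".join(user_messages_to_concat)
--         result.append({"role": "user", "content": concatenated_content})
--
--         return result
--
--     # No user messages to concatenate, return original
--     return messages
-- ===== SOURCE B (Python) =====
-- def concatenate_user_messages(messages):
--     """Forward single pass: find the start of the trailing run of user /
--     '(empty response)'-assistant messages, then merge its user contents."""
--     boundary = 0
--     for i, msg in enumerate(messages):
--         role = msg.get("role")
--         if not (role == "user" or
--                 (role == "assistant" and msg.get("content", "") == "(empty response)")):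
--             boundary = i + 1
--     user_contents = [m.get("content", "")
--                      for m in messages[boundary:] if m.get("role") == "user"]
--     if not user_contents:
--         return messages
--     return messages[:boundary] + [{"role": "user", "content": "\n".join(user_contents)}]
-- ===== Notes on version B (the rewrite author's own statement) =====
-- stated objective: simpler
-- what changed: Replaces A's backward while-loop with index bookkeeping and insert(0,...) accumulation by a forward pass that computes the boundary of the trailing run, then a slice plus a list comprehension collecting the user contents.
import Mathlib
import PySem

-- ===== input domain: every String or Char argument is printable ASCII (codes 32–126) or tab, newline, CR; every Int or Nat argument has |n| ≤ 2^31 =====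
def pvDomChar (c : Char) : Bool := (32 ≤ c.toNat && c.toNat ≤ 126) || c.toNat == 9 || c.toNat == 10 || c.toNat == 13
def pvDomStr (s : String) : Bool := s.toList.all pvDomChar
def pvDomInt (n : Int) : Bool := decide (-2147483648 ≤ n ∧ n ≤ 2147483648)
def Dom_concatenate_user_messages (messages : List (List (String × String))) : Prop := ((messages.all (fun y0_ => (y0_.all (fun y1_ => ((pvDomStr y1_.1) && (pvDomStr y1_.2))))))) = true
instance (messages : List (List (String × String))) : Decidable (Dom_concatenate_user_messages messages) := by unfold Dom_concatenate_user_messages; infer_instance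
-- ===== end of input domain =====

-- B changes the decomposition: one forward pass finds the boundary of the trailing run,
-- then a comprehension collects the user contents from the slice (objective: simpler).

-- dict.get(k) / dict.get(k, d) on an association list (first match), exact hand port
def dget? (m : List (String × String)) (k : String) : Option String :=
  match m with
  | [] => none
  | (a, b) :: r => if a == k then some b else dget? r k

def dgetD (m : List (String × String)) (k d : String) : String :=
  (dget? m k).getD d

-- ===== PORT A =====
-- A's backward while-loop: fuel n means current index i = n - 1; returns (i+1 at break, collected contents)
def aLoop (messages : List (List (String × String))) : Nat → List String → Nat × List String
  | 0, acc => (0, acc)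
  | (k+1), acc =>
    let msg := messages.getD k []
    let role := dget? msg "role"
    let content := dgetD msg "content" ""
    if role = some "user" then
      aLoop messages k (content :: acc)   -- insert(0, content)
    else if role = some "assistant" ∧ content = "(empty response)" then
      aLoop messages k acc
    else
      (k + 1, acc)

def concatenate_user_messages (messages : List (List (String × String))) : List (List (String × String)) :=
  if messages = [] then messages
  else
    let (b, user_messages_to_concat) := aLoop messages messages.length []
    if user_messages_to_concat ≠ [] then
      -- messages[: i+1] (= [] when the loop ran off the front, i.e. b = 0)
      let result := messages.take b
      result ++ [[("role", "user"), ("content", PySem.Str.join "\n" user_messages_to_concat)]]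
    else
      messages

-- ===== PORT B =====
def bKeep (m : List (String × String)) : Bool :=
  (dget? m "role" == some "user") ||
    ((dget? m "role" == some "assistant") && (dgetD m "content" "" == "(empty response)"))

def concatenate_user_messages_alt (messages : List (List (String × String))) : List (List (String × String)) :=
  let boundary := (PySem.List.enumerate messages).foldl
    (fun b p => if bKeep p.2 then b else p.1.toNat + 1) 0
  let user_contents := ((messages.drop boundary).filter
      (fun m => dget? m "role" = some "user")).map (fun m => dgetD m "content" "")
  if user_contents = [] then messages
  else messages.take boundary ++
    [[("role", "user"), ("content", PySem.Str.join "\n" user_contents)]]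

-- ===== PRECONDITION & SPEC =====
def Spec_concatenate_user_messages (messages : List (List (String × String))) (out : List (List (String × String))) : Prop := out = concatenate_user_messages_alt messages
instance (messages : List (List (String × String))) (out : List (List (String × String))) : Decidable (Spec_concatenate_user_messages messages out) := by unfold Spec_concatenate_user_messages; infer_instance

-- ===== CLAIM (what is proved, stated in full; the proofs are below) =====
def Claim_equal_concatenate_user_messages : Prop := ∀ (messages : List (List (String × String))), Dom_concatenate_user_messages messages → Spec_concatenate_user_messages messages (concatenate_user_messages messages)

-- ===== LEMMAS AND PROOFS =====

-- the collected list is accumulated on the right of acc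
theorem aLoop_acc (ms : List (List (String × String))) (k : Nat) (acc : List String) :
    aLoop ms k acc = ((aLoop ms k []).1, (aLoop ms k []).2 ++ acc) := by
  induction k generalizing acc with
  | zero => simp [aLoop]
  | succ k ih =>
    simp only [aLoop]
    split_ifs with h1 h2
    · rw [ih, ih [_]]; simp
    · rw [ih, ih ([] : List String)]
    · simp

theorem aLoop_fst_le (ms : List (List (String × String))) (k : Nat) (acc : List String) :
    (aLoop ms k acc).1 ≤ k := by
  induction k generalizing acc with
  | zero => simp [aLoop]
  | succ k ih =>
    simp only [aLoop]
    split_ifs with h1 h2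
    · exact le_trans (ih _) (Nat.le_succ k)
    · exact le_trans (ih _) (Nat.le_succ k)
    · simp

-- aLoop only looks at indices < k, so an appended element is irrelevant
theorem aLoop_append (ms : List (List (String × String))) (m : List (String × String))
    (k : Nat) (hk : k ≤ ms.length) (acc : List String) :
    aLoop (ms ++ [m]) k acc = aLoop ms k acc := by
  induction k generalizing acc with
  | zero => rfl
  | succ k ih =>
    have hget : (ms ++ [m]).getD k [] = ms.getD k [] := by
      have hk' : k < ms.length := hk
      simp [List.getD, List.getElem?_append_left hk']
    simp only [aLoop, hget]
    split_ifs with h1 h2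
    · exact ih (Nat.le_of_succ_le hk) _
    · exact ih (Nat.le_of_succ_le hk) _
    · rfl

theorem getD_append_self (ms : List (List (String × String))) (m : List (String × String)) :
    (ms ++ [m]).getD ms.length [] = m := by
  simp [List.getD]

-- the condition B tests, as it appears in A's branches
theorem bKeep_iff (m : List (String × String)) :
    bKeep m = true ↔
      (dget? m "role" = some "user" ∨
        (dget? m "role" = some "assistant" ∧ dgetD m "content" "" = "(empty response)")) := by
  simp [bKeep]

-- B's boundary fold equals the first component of A's backward scan
theorem enumerate_append_singleton {α : Type} (xs : List α) (x : α) (s : Int) :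
    PySem.List.enumerate (xs ++ [x]) s
      = PySem.List.enumerate xs s ++ [(s + xs.length, x)] := by
  induction xs generalizing s with
  | nil => simp [PySem.List.enumerate_cons, PySem.List.enumerate_nil]
  | cons y ys ih =>
    simp only [List.cons_append, PySem.List.enumerate_cons, ih, List.length_cons]
    push_cast; ring_nf

def bBoundary (ms : List (List (String × String))) : Nat :=
  (PySem.List.enumerate ms).foldl (fun b p => if bKeep p.2 then b else p.1.toNat + 1) 0

theorem bBoundary_eq (ms : List (List (String × String))) :
    bBoundary ms = (aLoop ms ms.length []).1 := by
  induction ms using List.reverseRecOn with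
  | nil => rfl
  | append_singleton ms m ih =>
    have hlen : (ms ++ [m]).length = ms.length + 1 := by simp
    have hB : bBoundary (ms ++ [m])
        = if bKeep m then bBoundary ms else ms.length + 1 := by
      unfold bBoundary
      rw [enumerate_append_singleton, List.foldl_append]
      simp
    rw [hB, hlen]
    simp only [aLoop, getD_append_self]
    by_cases h1 : dget? m "role" = some "user"
    · have hk : bKeep m = true := (bKeep_iff m).mpr (Or.inl h1)
      rw [if_pos h1, aLoop_append ms m ms.length le_rfl, aLoop_acc, hk, if_pos rfl, ih]
    · by_cases h2 : dget? m "role" = some "assistant" ∧ dgetD m "content" "" = "(empty response)"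
      · have hk : bKeep m = true := (bKeep_iff m).mpr (Or.inr h2)
        rw [if_neg h1, if_pos h2, aLoop_append ms m ms.length le_rfl, hk, if_pos rfl, ih]
      · have hk : bKeep m = false := by
          rw [Bool.eq_false_iff, Ne, bKeep_iff]; tauto
        rw [if_neg h1, if_neg h2, hk]; simp

-- the collected contents are exactly the user contents of the trailing slice
theorem aLoop_snd_eq (ms : List (List (String × String))) :
    (aLoop ms ms.length []).2
      = ((ms.drop (aLoop ms ms.length []).1).filter
          (fun m => dget? m "role" = some "user")).map (fun m => dgetD m "content" "") := by
  induction ms using List.reverseRecOn with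
  | nil => rfl
  | append_singleton ms m ih =>
    have hlen : (ms ++ [m]).length = ms.length + 1 := by simp
    rw [hlen]
    simp only [aLoop, getD_append_self]
    by_cases h1 : dget? m "role" = some "user"
    · rw [if_pos h1, aLoop_append ms m ms.length le_rfl, aLoop_acc]
      have hle : (aLoop ms ms.length []).1 ≤ ms.length := aLoop_fst_le ms ms.length []
      rw [List.drop_append_of_le_length hle]
      simp [List.filter_append, List.map_append, h1, ih]
    · by_cases h2 : dget? m "role" = some "assistant" ∧ dgetD m "content" "" = "(empty response)"
      · rw [if_neg h1, if_pos h2, aLoop_append ms m ms.length le_rfl]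
        have hle : (aLoop ms ms.length []).1 ≤ ms.length := aLoop_fst_le ms ms.length []
        rw [List.drop_append_of_le_length hle]
        simp [List.filter_append, h1, ih]
      · rw [if_neg h1, if_neg h2]
        simp

-- ===== VERDICT (by name: the statement is the Claim_ definition above) =====
theorem concatenate_user_messages_spec : Claim_equal_concatenate_user_messages := by
  intro ms _
  show concatenate_user_messages ms = concatenate_user_messages_alt ms
  unfold concatenate_user_messages concatenate_user_messages_alt
  by_cases hnil : ms = []
  · subst hnil; rfl
  · rw [if_neg hnil]
    have hb : (PySem.List.enumerate ms).foldl
        (fun b p => if bKeep p.2 then b else p.1.toNat + 1) 0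
        = (aLoop ms ms.length []).1 := bBoundary_eq ms
    simp only [hb, ← aLoop_snd_eq]
    rcases h : aLoop ms ms.length [] with ⟨b, c⟩
    by_cases hc : c = []
    · subst hc; simp
    · simp [hc]
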